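-- pv_equiv track=rewrite | github.com/hyang012/side_projects | 2048.py | row_is_left_movable
-- ===== SOURCE A (Python) =====
-- def row_is_left_movable(row):
--     def change(i):
--         if row[i] == 0 and row[i+1] != 0:  # Can be moved
--             return True
--         if row[i] != 0 and row[i+1] == row[i]: # Can be moved
--             return True
--         return False
--     return any(change(i) for i in range(len(row) - 1))
-- ===== SOURCE B (Python) =====
-- def row_is_left_movable(row):
--     tiles = [x for x in row if x != 0]
--     if row[:len(tiles)] != tiles:
--         return True
--     return any(a == b for a, b in zip(tiles, tiles[1:]))
-- ===== Notes on version B (the rewrite author's own statement) =====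
-- stated objective: alternative
-- what changed: B replaces A's single indexed scan of raw adjacent cells with a compact-then-test decomposition: it filters out zeros once, detects a slide by comparing the row's leading slice with the packed nonzeros, and detects a merge by an adjacency check on the compacted list.
import Mathlib
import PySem

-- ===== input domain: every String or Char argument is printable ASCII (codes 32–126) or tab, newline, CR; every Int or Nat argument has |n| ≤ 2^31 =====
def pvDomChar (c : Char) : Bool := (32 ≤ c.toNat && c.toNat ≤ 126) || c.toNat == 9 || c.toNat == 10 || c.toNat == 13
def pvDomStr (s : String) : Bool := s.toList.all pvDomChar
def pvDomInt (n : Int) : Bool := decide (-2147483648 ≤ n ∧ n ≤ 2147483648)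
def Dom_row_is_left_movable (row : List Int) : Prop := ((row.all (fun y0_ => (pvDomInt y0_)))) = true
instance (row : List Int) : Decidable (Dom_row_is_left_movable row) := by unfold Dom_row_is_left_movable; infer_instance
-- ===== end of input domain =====

-- B detects a left move by compacting the row (filter out zeros) and testing a slide
-- (leading slice ≠ packed nonzeros) or a merge (equal adjacent compacted tiles),
-- instead of A's indexed scan of raw adjacent cells; objective: alternative decomposition.

-- ===== PORT A =====
def row_is_left_movable (row : List Int) : Bool :=
  -- any(change(i) for i in range(len(row)-1)); row[i] and row[i+1] are always in range here
  (PySem.List.pyRange 0 ((row.length : Int) - 1) 1).any (fun i =>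
    if PySem.List.pyGetD row i 0 = 0 ∧ PySem.List.pyGetD row (i+1) 0 ≠ 0 then true
    else if PySem.List.pyGetD row i 0 ≠ 0 ∧ PySem.List.pyGetD row (i+1) 0 = PySem.List.pyGetD row i 0 then true
    else false)

-- ===== PORT B =====
def row_is_left_movable_alt (row : List Int) : Bool :=
  let tiles := row.filter (fun x => decide (x ≠ 0))
  if PySem.List.slice row none (some (tiles.length : Int)) ≠ tiles then true
  else (tiles.zip (PySem.List.slice tiles (some 1) none)).any (fun p => decide (p.1 = p.2))

-- ===== PRECONDITION & SPEC =====
def Spec_row_is_left_movable (row : List Int) (out : Bool) : Prop := out = row_is_left_movable_alt row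
instance (row : List Int) (out : Bool) : Decidable (Spec_row_is_left_movable row out) := by unfold Spec_row_is_left_movable; infer_instance

-- ===== CLAIM (what is proved, stated in full; the proofs are below) =====
def Claim_equal_row_is_left_movable : Prop := ∀ (row : List Int), Dom_row_is_left_movable row → Spec_row_is_left_movable row (row_is_left_movable row)

-- ===== LEMMAS AND PROOFS =====

-- reference recursion: A's adjacent-pair scan written as structural recursion
def scanAdj : List Int → Bool
  | a :: b :: t => (decide (a = 0) && decide (b ≠ 0)) || (decide (a ≠ 0) && decide (b = a)) || scanAdj (b :: t)
  | _ => false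

lemma scan_zero (s : List Int) : scanAdj (0 :: s) = s.any (fun x => decide (x ≠ 0)) := by
  induction s with
  | nil => rfl
  | cons b t ih =>
    by_cases hb : b = 0
    · subst hb; simp [scanAdj, ih]
    · simp [scanAdj, hb]

-- B reduced: slideOrMerge
def adjEq (l : List Int) : Bool := (l.zip l.tail).any (fun p => decide (p.1 = p.2))
def tilesOf (r : List Int) : List Int := r.filter (fun x => decide (x ≠ 0))
def bRed (r : List Int) : Bool := if r.take (tilesOf r).length ≠ tilesOf r then true else adjEq (tilesOf r)

lemma mem_tiles_ne_zero {r : List Int} {x : Int} (h : x ∈ tilesOf r) : x ≠ 0 := by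
  have := List.of_mem_filter h; simpa using this

lemma adjEq_nil : adjEq [] = false := rfl

lemma take_zero_iff (s : List Int) :
    ((0 :: s).take (tilesOf (0 :: s)).length = tilesOf (0 :: s)) ↔ tilesOf s = [] := by
  have ht : tilesOf (0 :: s) = tilesOf s := by simp [tilesOf]
  rw [ht]
  cases hf : tilesOf s with
  | nil => simp
  | cons x xs =>
    constructor
    · intro h
      simp [List.take_succ_cons] at h
      exact absurd h.1.symm (mem_tiles_ne_zero (r := s) (by rw [hf]; exact List.mem_cons_self))
    · intro h; simp at h

lemma bRed_zero (s : List Int) : bRed (0 :: s) = s.any (fun x => decide (x ≠ 0)) := by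
  by_cases h : tilesOf s = []
  · have hz : ∀ x ∈ s, x = 0 := by
      intro x hx
      by_contra hne
      have : x ∈ tilesOf s := List.mem_filter.mpr ⟨hx, by simpa using hne⟩
      simp [h] at this
    have hany : s.any (fun x => decide (x ≠ 0)) = false := by
      simp only [List.any_eq_false]
      intro x hx; simpa using hz x hx
    rw [hany]
    unfold bRed
    rw [if_neg (by simpa using (take_zero_iff s).mpr h)]
    have : tilesOf (0 :: s) = tilesOf s := by simp [tilesOf]
    rw [this, h, adjEq_nil]
  · unfold bRed
    rw [if_pos (by simpa using fun hh => h ((take_zero_iff s).mp hh))]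
    rcases List.ne_nil_iff_exists_cons.mp h with ⟨x, xs, hf⟩
    have hx : x ∈ tilesOf s := by rw [hf]; exact List.mem_cons_self
    exact (List.any_eq_true.mpr ⟨x, List.mem_of_mem_filter hx, by simpa using mem_tiles_ne_zero hx⟩).symm


lemma adjEq_cons_cons (a c : Int) (m : List Int) :
    adjEq (a :: c :: m) = (decide (a = c) || adjEq (c :: m)) := by
  simp [adjEq]

lemma take_cons_ne {a : Int} (s : List Int) (ha : a ≠ 0) :
    ((a :: s).take (tilesOf (a :: s)).length = tilesOf (a :: s)) ↔
      (s.take (tilesOf s).length = tilesOf s) := by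
  have ht : tilesOf (a :: s) = a :: tilesOf s := by simp [tilesOf, ha]
  rw [ht]
  simp [List.take_succ_cons]

lemma bRed_eq_scanAdj : ∀ r : List Int, bRed r = scanAdj r := by
  intro r
  induction r with
  | nil => rfl
  | cons a s ih =>
    by_cases ha : a = 0
    · subst ha; rw [bRed_zero, scan_zero]
    · have ht : tilesOf (a :: s) = a :: tilesOf s := by simp [tilesOf, ha]
      cases s with
      | nil =>
        simp [bRed, tilesOf, adjEq, scanAdj, ha]
      | cons b t =>
        by_cases hb : b = 0
        · subst hb
          have hscan : scanAdj (a :: 0 :: t) = t.any (fun x => decide (x ≠ 0)) := by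
            have h0 : decide ((0:Int) = a) = false := by simpa using fun h => ha h.symm
            simp only [scanAdj, decide_eq_false ha]
            rw [scan_zero]
            simp [h0, ha]
          rw [hscan]
          unfold bRed
          by_cases h : tilesOf t = []
          · have hcond : (a :: 0 :: t).take (tilesOf (a :: 0 :: t)).length = tilesOf (a :: 0 :: t) := by
              rw [take_cons_ne _ ha]
              exact (take_zero_iff t).mpr h
            rw [if_neg (by simpa using hcond), ht]
            have ht0 : tilesOf (0 :: t) = tilesOf t := by simp [tilesOf]
            rw [ht0, h]
            have hany : t.any (fun x => decide (x ≠ 0)) = false := by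
              simp only [List.any_eq_false]
              intro x hx
              by_contra hne
              have : x ∈ tilesOf t := List.mem_filter.mpr ⟨hx, by simpa using hne⟩
              simp [h] at this
            rw [hany]; rfl
          · have hcond : ¬ ((a :: 0 :: t).take (tilesOf (a :: 0 :: t)).length = tilesOf (a :: 0 :: t)) := by
              rw [take_cons_ne _ ha]
              exact fun hh => h ((take_zero_iff t).mp hh)
            rw [if_pos (by simpa using hcond)]
            rcases List.ne_nil_iff_exists_cons.mp h with ⟨x, xs, hf⟩
            have hx : x ∈ tilesOf t := by rw [hf]; exact List.mem_cons_self
            exact (List.any_eq_true.mpr ⟨x, List.mem_of_mem_filter hx, by simpa using mem_tiles_ne_zero hx⟩).symm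
        · -- a ≠ 0, b ≠ 0
          have htb : tilesOf (b :: t) = b :: tilesOf t := by simp [tilesOf, hb]
          have hstep : bRed (a :: b :: t) = (decide (b = a) || bRed (b :: t)) := by
            unfold bRed
            by_cases hc : (b :: t).take (tilesOf (b :: t)).length = tilesOf (b :: t)
            · rw [if_neg (by simpa using (take_cons_ne (b :: t) ha).mpr (by
                  rw [take_cons_ne t hb] at hc ⊢; exact hc)), if_neg (by simpa using hc)]
              rw [ht, htb, adjEq_cons_cons]
              have : decide (a = b) = decide (b = a) := by simp [eq_comm]
              rw [this]
            · rw [if_pos (by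
                  simp only [ne_eq]
                  intro hh
                  exact hc ((take_cons_ne (b :: t) ha).mp hh)), if_pos (by simpa using hc)]
              simp
          rw [hstep, ih]
          simp [scanAdj, ha, hb]

lemma key : ∀ r : List Int, (List.range (r.length - 1)).any
      (fun k => ((decide (r.getD k 0 = 0) && decide (r.getD (k+1) 0 ≠ 0)) ||
                (decide (r.getD k 0 ≠ 0) && decide (r.getD (k+1) 0 = r.getD k 0)))) = scanAdj r := by
  intro r
  induction r with
  | nil => rfl
  | cons a s ih =>
    cases s with
    | nil => rfl
    | cons b t =>
      have hlen : (a :: b :: t).length - 1 = ((b :: t).length - 1) + 1 := by simp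
      rw [hlen, List.range_succ_eq_map, List.any_cons, List.any_map]
      simp only [Function.comp_def, Nat.succ_eq_add_one, List.getD_cons_succ, List.getD_cons_zero]
      simp only [List.getD_cons_succ] at ih
      rw [ih]
      simp [scanAdj]

lemma portB_eq_bRed (row : List Int) : row_is_left_movable_alt row = bRed row := by
  unfold row_is_left_movable_alt bRed tilesOf adjEq
  simp only [PySem.List.slice_to_natCast, PySem.List.slice_from_one]

lemma portA_eq_scanAdj (row : List Int) : row_is_left_movable row = scanAdj row := by
  unfold row_is_left_movable
  rw [PySem.List.pyRange_one, List.any_map]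
  have hcast : ((row.length : Int) - 1 - 0).toNat = row.length - 1 := by omega
  rw [hcast]
  have hfun : ((fun i => if PySem.List.pyGetD row i 0 = 0 ∧ PySem.List.pyGetD row (i+1) 0 ≠ 0 then true
      else if PySem.List.pyGetD row i 0 ≠ 0 ∧ PySem.List.pyGetD row (i+1) 0 = PySem.List.pyGetD row i 0 then true
      else false) ∘ (fun k : Nat => (0 : Int) + k))
      = (fun k => ((decide (row.getD k 0 = 0) && decide (row.getD (k+1) 0 ≠ 0)) ||
        (decide (row.getD k 0 ≠ 0) && decide (row.getD (k+1) 0 = row.getD k 0)))) := by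
    funext k
    simp only [Function.comp_def, zero_add]
    have h1 : (k : Int) + 1 = ((k+1 : Nat) : Int) := by push_cast; ring
    rw [h1, PySem.List.pyGetD_natCast, PySem.List.pyGetD_natCast]
    split_ifs with h h2 <;> simp_all
  rw [hfun]
  exact key row

-- ===== VERDICT (by name: the statement is the Claim_ definition above) =====
theorem row_is_left_movable_spec : Claim_equal_row_is_left_movable := by
  intro row _
  unfold Spec_row_is_left_movable
  rw [portA_eq_scanAdj, portB_eq_bRed, bRed_eq_scanAdj]
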